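-- pv_equiv track=rewrite | github.com/hamzahfauzy/indobert_cdtm | cdtm_indobert.py | assign_topic
-- ===== SOURCE A (Python) =====
-- def assign_topic(tokens, topic_labels, time_slice):
--     labels_this_slice = topic_labels.get(time_slice, {})
--     scores = {}
--
--     for topic_id, label in labels_this_slice.items():
--         keywords = label.split("_")
--         score = sum(1 for k in keywords if k in tokens)
--         scores[topic_id] = score
--
--     # jika semua skor 0 → noise
--     if max(scores.values(), default=0) == 0:
--         return -1  # unknown / noise
--
--     return max(scores, key=scores.get)
-- ===== SOURCE B (Python) =====
-- def assign_topic(tokens, topic_labels, time_slice):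
--     best_id, best_score = -1, 0
--     for topic_id, label in topic_labels.get(time_slice, {}).items():
--         score = 0
--         for k in label.split("_"):
--             if k in tokens:
--                 score += 1
--         if best_score < score:
--             best_id, best_score = topic_id, score
--     return best_id
-- ===== Notes on version B (the rewrite author's own statement) =====
-- stated objective: simpler
-- what changed: Replaces the scores dict plus two separate max scans (max over values, then argmax over keys) with a single fused loop keeping a running (best_id, best_score) accumulator started at (-1, 0) with a strict '>' update, so no intermediate dict and no second pass exist.
import Mathlib
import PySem

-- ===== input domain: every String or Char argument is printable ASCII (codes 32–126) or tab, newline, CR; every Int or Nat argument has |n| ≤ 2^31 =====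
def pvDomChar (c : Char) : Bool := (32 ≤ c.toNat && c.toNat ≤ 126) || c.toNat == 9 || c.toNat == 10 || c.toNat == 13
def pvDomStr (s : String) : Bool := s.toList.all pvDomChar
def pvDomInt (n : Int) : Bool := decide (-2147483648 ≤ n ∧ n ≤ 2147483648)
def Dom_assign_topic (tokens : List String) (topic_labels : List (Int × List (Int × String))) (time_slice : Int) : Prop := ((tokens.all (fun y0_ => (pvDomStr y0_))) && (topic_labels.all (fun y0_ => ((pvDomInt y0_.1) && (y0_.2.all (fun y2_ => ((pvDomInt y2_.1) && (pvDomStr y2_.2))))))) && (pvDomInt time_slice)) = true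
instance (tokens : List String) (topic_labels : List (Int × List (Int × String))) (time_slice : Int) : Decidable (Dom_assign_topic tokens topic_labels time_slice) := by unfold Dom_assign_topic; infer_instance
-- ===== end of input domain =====

-- B replaces A's scores dict and two separate max scans by one fused loop with a (best_id, best_score) accumulator (simpler decomposition; same asymptotic cost).

-- ===== PORT A =====
-- note: label.split("_") has a non-empty separator, so PySem.Str.split? always returns some here (.getD [] is never taken);
-- max(scores, key=scores.get) is ported as max? over keys with getD (every key is present in scores), and its .getD (-1)
-- default is unreachable: that branch runs only when scores has a non-zero value, hence is non-empty.
def assign_topic (tokens : List String) (topic_labels : List (Int × List (Int × String))) (time_slice : Int) : Int :=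
  let labels_this_slice := (PySem.Dict.mk topic_labels).getD time_slice []
  let scores : PySem.Dict Int Int :=
    labels_this_slice.foldl (fun d p =>
      let keywords := (PySem.Str.split? p.2 "_").getD []
      let score := keywords.foldl (fun c k => if tokens.contains k then c + 1 else c) (0 : Int)
      d.insert p.1 score) PySem.Dict.empty
  if (PySem.List.max? scores.values (fun v => v)).getD 0 = 0 then -1
  else (PySem.List.max? scores.keys (fun k => scores.getD k 0)).getD (-1)

-- ===== PORT B =====
def assign_topic_alt (tokens : List String) (topic_labels : List (Int × List (Int × String))) (time_slice : Int) : Int :=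
  (((PySem.Dict.mk topic_labels).getD time_slice []).foldl (fun (b : Int × Int) p =>
      let score := ((PySem.Str.split? p.2 "_").getD []).foldl (fun c k => if tokens.contains k then c + 1 else c) (0 : Int)
      if b.2 < score then (p.1, score) else b) (-1, 0)).1

-- ===== PRECONDITION & SPEC =====
-- Pre_ excludes association lists with duplicate keys (a repeated time slice, or a repeated topic id inside a slice):
-- such lists do not represent any Python dict (both arguments are dicts in Python), so nothing about A's behaviour on
-- them is specified; the ports use first-match / overwrite conventions that only coincide on duplicate-free lists.
def Pre_assign_topic (tokens : List String) (topic_labels : List (Int × List (Int × String))) (time_slice : Int) : Prop :=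
  (topic_labels.map Prod.fst).Nodup ∧ ∀ e ∈ topic_labels, (e.2.map Prod.fst).Nodup
instance (tokens : List String) (topic_labels : List (Int × List (Int × String))) (time_slice : Int) : Decidable (Pre_assign_topic tokens topic_labels time_slice) := by unfold Pre_assign_topic; infer_instance
def pvWitness_assign_topic : List String × (List (Int × List (Int × String))) × Int :=
  (["aa", "b"], [(0, [(1, "aa_b"), (2, "c")]), (1, [(3, "b")])], 0)
def Spec_assign_topic (tokens : List String) (topic_labels : List (Int × List (Int × String))) (time_slice : Int) (out : Int) : Prop := out = assign_topic_alt tokens topic_labels time_slice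
instance (tokens : List String) (topic_labels : List (Int × List (Int × String))) (time_slice : Int) (out : Int) : Decidable (Spec_assign_topic tokens topic_labels time_slice out) := by unfold Spec_assign_topic; infer_instance

-- ===== CLAIM (what is proved, stated in full; the proofs are below) =====
def Claim_equal_assign_topic : Prop := ∀ (tokens : List String) (topic_labels : List (Int × List (Int × String))) (time_slice : Int), Dom_assign_topic tokens topic_labels time_slice → Pre_assign_topic tokens topic_labels time_slice → Spec_assign_topic tokens topic_labels time_slice (assign_topic tokens topic_labels time_slice)

-- ===== LEMMAS AND PROOFS =====

-- B's fused update step, on (id, score) pairs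
def pvF : Int × Int → Int × Int → Int × Int := fun b q => if b.2 < q.2 then q else b

-- auxiliary for unfolding max? on a cons
theorem pv_foldl_some {α : Type} (t : List α) (key : α → Int) (b : α) :
    List.foldl (fun acc x => match acc with
        | none => some x
        | some m => if key m < key x then some x else some m) (some b) t
      = some (t.foldl (fun m x => if key m < key x then x else m) b) := by
  induction t generalizing b with
  | nil => rfl
  | cons q t ih =>
      simp only [List.foldl]
      by_cases h : key b < key q <;> simp only [h] <;> exact ih _

theorem pv_max?_cons {α : Type} (x : α) (t : List α) (key : α → Int) :
    PySem.List.max? (x :: t) key = some (t.foldl (fun m y => if key m < key y then y else m) x) := by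
  unfold PySem.List.max?
  simp only [List.foldl]
  exact pv_foldl_some t key x

-- the key-level argmax fold equals the pair-level fold pvF
theorem pv_keysfold (l : List (Int × Int)) (g : Int → Int) (b : Int × Int)
    (hg : ∀ p ∈ l, g p.1 = p.2) (hb : g b.1 = b.2) :
    (l.map Prod.fst).foldl (fun x k => if g x < g k then k else x) b.1 = (l.foldl pvF b).1 := by
  induction l generalizing b with
  | nil => rfl
  | cons q t ih =>
      simp only [List.map, List.foldl]
      have hq : g q.1 = q.2 := hg q (List.mem_cons_self ..)
      have hstep : (if g b.1 < g q.1 then q.1 else b.1) = (pvF b q).1 := by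
        simp only [pvF, hb, hq]
        by_cases h : b.2 < q.2 <;> simp [h]
      rw [hstep]
      exact ih (pvF b q) (fun p hp => hg p (List.mem_cons_of_mem _ hp))
        (by simp only [pvF]; by_cases h : b.2 < q.2 <;> simp [h, hb, hq])

-- pvF keeps the accumulator when no element beats it
theorem pv_fold_const (l : List (Int × Int)) (b : Int × Int) (h : ∀ p ∈ l, p.2 ≤ b.2) :
    l.foldl pvF b = b := by
  induction l with
  | nil => rfl
  | cons q t ih =>
      have hq : q.2 ≤ b.2 := h q (List.mem_cons_self ..)
      simp only [List.foldl, pvF, if_neg (not_lt.mpr hq)]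
      exact ih (fun p hp => h p (List.mem_cons_of_mem _ hp))

-- two starts with equal score give the same winner id once some element beats that score
theorem pv_fold_fst_congr (l : List (Int × Int)) (b c : Int × Int) (h2 : b.2 = c.2)
    (hex : ∃ p ∈ l, b.2 < p.2) : (l.foldl pvF b).1 = (l.foldl pvF c).1 := by
  induction l generalizing b c with
  | nil => obtain ⟨p, hp, _⟩ := hex; cases hp
  | cons q t ih =>
      simp only [List.foldl]
      by_cases h : b.2 < q.2
      · rw [show pvF b q = q by simp [pvF, h], show pvF c q = q by simp [pvF, h2 ▸ h]]
      · rw [show pvF b q = b by simp [pvF, h], show pvF c q = c by simp [pvF, h2 ▸ h]]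
        obtain ⟨p, hp, hbp⟩ := hex
        rcases List.mem_cons.mp hp with rfl | hpt
        · exact absurd hbp h
        · exact ih b c h2 ⟨p, hpt, hbp⟩

-- the core: A's "max over values then argmax over keys via g" equals B's single fused fold
theorem pv_core (l : List (Int × Int)) (g : Int → Int)
    (hg : ∀ p ∈ l, g p.1 = p.2) (hnn : ∀ p ∈ l, 0 ≤ p.2) :
    (if (PySem.List.max? (l.map Prod.snd) (fun v => v)).getD 0 = 0 then (-1 : Int)
     else (PySem.List.max? (l.map Prod.fst) g).getD (-1))
    = (l.foldl pvF (-1, 0)).1 := by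
  cases l with
  | nil => simp [PySem.List.max?]
  | cons q t =>
      have hmax := PySem.List.max?_id_cons q.2 (t.map Prod.snd)
      have hle := PySem.List.le_foldl_max (t.map Prod.snd) q.2
      set M := (t.map Prod.snd).foldl max q.2 with hM
      have hq2 : 0 ≤ q.2 := hnn q (List.mem_cons_self ..)
      simp only [List.map, show PySem.List.max? (q.2 :: t.map Prod.snd) (fun y => y) = some M from hmax, Option.getD_some]
      by_cases hz : M = 0
      · -- all scores are 0: both return -1
        have hall : ∀ p ∈ t, p.2 ≤ (0 : Int) := fun p hp => hz ▸ hle.2 p.2 (List.mem_map_of_mem hp)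
        have hq0 : q.2 = 0 := le_antisymm (hz ▸ hle.1) hq2
        rw [if_pos hz]
        simp only [List.foldl, pvF, hq0, if_neg (lt_irrefl (0 : Int))]
        rw [pv_fold_const t (-1, 0) (by simpa using hall)]
      · rw [if_neg hz]
        rw [pv_max?_cons q.1 (t.map Prod.fst) g]
        have hmm : (t.map Prod.fst) = ((t : List (Int × Int)).map Prod.fst) := rfl
        rw [pv_keysfold t g q (fun p hp => hg p (List.mem_cons_of_mem _ hp))
              (hg q (List.mem_cons_self ..))]
        simp only [Option.getD_some, List.foldl]
        by_cases h0 : (0 : Int) < q.2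
        · rw [show pvF (-1, 0) q = q from by simp [pvF, h0]]
        · have hq0 : q.2 = 0 := le_antisymm (not_lt.mp h0) hq2
          rw [show pvF (-1, 0) q = (-1, 0) from by simp [pvF, h0]]
          have hMpos : 0 < M := lt_of_le_of_ne (hq0 ▸ hle.1) (Ne.symm hz)
          have hex : ∃ p ∈ t, (0 : Int) < p.2 := by
            rcases PySem.List.foldl_max_mem (t.map Prod.snd) q.2 with he | he
            · exact absurd (by rw [hM]; exact he.trans hq0) hz
            · obtain ⟨p, hp, hpv⟩ := List.mem_map.mp he
              exact ⟨p, hp, by rw [hpv, ← hM]; exact hMpos⟩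
          exact pv_fold_fst_congr t q (-1, 0) hq0 (by simpa [hq0] using hex)

-- the slice looked up from a duplicate-free outer list is [] or one of its values
theorem pv_lookup_mem (tl : List (Int × List (Int × String))) (ts : Int) :
    (PySem.Dict.mk tl).getD ts [] = [] ∨ ∃ e ∈ tl, (PySem.Dict.mk tl).getD ts [] = e.2 := by
  cases h : (PySem.Dict.mk tl).get? ts with
  | none => left; simp [PySem.Dict.getD, h]
  | some v =>
      right
      refine ⟨(ts, v), PySem.Dict.mem_items_of_get?_eq_some _ h, ?_⟩
      simp [PySem.Dict.getD, h]

-- scores of a keyword loop are nonnegative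
theorem pv_sc_mono (tokens : List String) (ks : List String) (c : Int) :
    c ≤ ks.foldl (fun c k => if tokens.contains k then c + 1 else c) c := by
  induction ks generalizing c with
  | nil => exact le_refl c
  | cons k t ih =>
      simp only [List.foldl]
      by_cases h : tokens.contains k
      · simp only [h, if_true]; exact le_trans (by omega) (ih (c + 1))
      · simp only [h]; exact ih c

-- ===== VERDICT (by name: the statement is the Claim_ definition above) =====
theorem assign_topic_spec : Claim_equal_assign_topic := by
  intro tokens tl ts _ hpre
  show assign_topic tokens tl ts = assign_topic_alt tokens tl ts
  set labels := (PySem.Dict.mk tl).getD ts [] with hlabels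
  set sc : Int × String → Int :=
    fun p => ((PySem.Str.split? p.2 "_").getD []).foldl (fun c k => if tokens.contains k then c + 1 else c) (0 : Int) with hsc
  set l : List (Int × Int) := labels.map (fun p => (p.1, sc p)) with hl
  set scores : PySem.Dict Int Int :=
    labels.foldl (fun d p => d.insert p.1 (sc p)) PySem.Dict.empty with hscores
  -- duplicate-free topic ids in the looked-up slice
  have hnd : (labels.map Prod.fst).Nodup := by
    rcases pv_lookup_mem tl ts with h | ⟨e, he, h⟩
    · rw [← hlabels] at h; rw [h]; exact List.nodup_nil
    · rw [← hlabels] at h; rw [h]; exact hpre.2 e he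
  have hndl : (l.map Prod.fst).Nodup := by
    rw [hl, List.map_map]; exact hnd
  -- the scores dict's items are exactly l
  have hitems : scores.items = l := by
    have h := PySem.Dict.items_foldl_insert_fresh labels Prod.fst sc PySem.Dict.empty
      (fun a _ => PySem.Dict.contains_empty a.1) hnd
    exact h
  have hkeys : scores.keys = l.map Prod.fst := by
    simp only [PySem.Dict.keys, hitems]
  have hvals : scores.values = l.map Prod.snd := by
    simp only [PySem.Dict.values, hitems]
  have hknd : scores.keys.Nodup := by rw [hkeys]; exact hndl
  have hg : ∀ p ∈ l, scores.getD p.1 0 = p.2 := by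
    intro p hp
    exact PySem.Dict.getD_of_mem_items scores (hitems ▸ hp) hknd 0
  have hnn : ∀ p ∈ l, 0 ≤ p.2 := by
    intro p hp
    rw [hl] at hp
    obtain ⟨q, _, rfl⟩ := List.mem_map.mp hp
    exact pv_sc_mono tokens _ 0
  have hA : assign_topic tokens tl ts
      = (if (PySem.List.max? scores.values (fun v => v)).getD 0 = 0 then (-1 : Int)
         else (PySem.List.max? scores.keys (fun k => scores.getD k 0)).getD (-1)) := rfl
  have hB : assign_topic_alt tokens tl ts = (l.foldl pvF (-1, 0)).1 := by
    rw [hl, List.foldl_map]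
    rfl
  rw [hA, hB, hkeys, hvals]
  exact pv_core l (fun k => scores.getD k 0) hg hnn
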